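-- pv_equiv track=rewrite | github.com/JulioSD26/Espressoft | Espressoft-master/controlador_general_ventas.py | obtener_periodos_con_menos_y_mas_ventas_mensuales
-- ===== SOURCE A (Python) =====
-- def obtener_periodos_con_menos_y_mas_ventas_mensuales(diccionario_datos: dict):
--     """
--     Recibe como parametro un diccionario de datos, donde sus llaves son sus periodos de tiempo
--     y sus valores son sus totales correspondientes.
--     Regresa 2 valores, el primero siendo el periodo con menos ventas y el segundo el periodo con mas ventas.
--     """
--     periodos_de_tiempo = list(diccionario_datos.keys())
--     # inicialmente a ambos periodos se les asigna como maximo y minimo el primer elemento/llave/periodo del diccionario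
--     # para este punto ya tiene que estar validado que el diccionario no tiene que estar vacio
--     periodo_con_menos_ventas = periodo_con_mas_ventas = None
--     # se va recorriendo cada periodo en los periodos de tiempo
--     for periodo in periodos_de_tiempo:
--         # se va obteniendo el total de cada periodo
--         total_del_periodo = diccionario_datos[periodo]
--         # se valida que el valor del total no sea 0
--         if total_del_periodo != 0:
--             # si el valor del total no es 0 y aún no se han asignado periodos con menos o más ventas
--             # se asigna el periodo actual como el periodo con menos y más ventas
--             if periodo_con_menos_ventas is None and periodo_con_mas_ventas is None:
--                 periodo_con_menos_ventas = periodo_con_mas_ventas = periodo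
--             else:
--                 # si ya se han asignado periodos con menos o más ventas
--                 # se compara el valor del total con el valor del total del periodo con menos/más ventas actual
--                 if total_del_periodo < diccionario_datos[periodo_con_menos_ventas]:
--                     # entonces periodo con menos ventas ahora se convierte en ese periodo
--                     periodo_con_menos_ventas = periodo
--                 # misma lógica que la anterior, solo que para el periodo con más ventas
--                 if total_del_periodo > diccionario_datos[periodo_con_mas_ventas]:
--                     periodo_con_mas_ventas = periodo
--     return periodo_con_menos_ventas, periodo_con_mas_ventas
-- ===== SOURCE B (Python) =====
-- def obtener_periodos_con_menos_y_mas_ventas_mensuales(diccionario_datos: dict):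
--     """Same result as A: first period with least / greatest non-zero total, (None, None) if none."""
--     periodos = [p for p, total in diccionario_datos.items() if total != 0]
--     if not periodos:
--         return None, None
--     return (min(periodos, key=lambda p: diccionario_datos[p]),
--             max(periodos, key=lambda p: diccionario_datos[p]))
-- ===== Notes on version B (the rewrite author's own statement) =====
-- stated objective: simpler
-- what changed: Replaces A's single hand-rolled loop carrying two optional accumulators and a first-assignment branch by a comprehension filtering the non-zero periods followed by builtin min/max with a key (whose first-extremal tie-break matches A's first-encountered rule).
import Mathlib
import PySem

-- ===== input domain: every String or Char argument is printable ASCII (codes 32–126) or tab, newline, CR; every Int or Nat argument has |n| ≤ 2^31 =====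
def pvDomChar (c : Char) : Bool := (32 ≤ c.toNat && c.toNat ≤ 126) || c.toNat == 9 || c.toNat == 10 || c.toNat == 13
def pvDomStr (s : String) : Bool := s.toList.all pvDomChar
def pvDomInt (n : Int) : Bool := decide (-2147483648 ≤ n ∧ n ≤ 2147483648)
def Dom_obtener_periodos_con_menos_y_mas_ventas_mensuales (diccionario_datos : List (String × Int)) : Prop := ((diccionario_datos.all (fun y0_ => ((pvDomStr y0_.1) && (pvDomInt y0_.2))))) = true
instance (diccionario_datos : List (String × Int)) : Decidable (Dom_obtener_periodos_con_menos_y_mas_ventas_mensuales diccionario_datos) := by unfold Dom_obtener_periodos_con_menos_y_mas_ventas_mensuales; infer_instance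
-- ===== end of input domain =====

-- B replaces A's hand-rolled two-accumulator loop by filter + min/max with a key (same cost, simpler).


-- ===== PORT A =====
-- diccionario_datos[periodo]: the key is always present (it comes from .keys()), so getD is exact here.
def pvLookup (diccionario_datos : List (String × Int)) (periodo : String) : Int :=
  (PySem.Dict.mk diccionario_datos).getD periodo 0

-- the loop body of A; the `| _ =>` branch is Python's `if … is None and … is None` first-assignment
-- case (mixed none/some states never arise from the initial (none, none) state, matching Python,
-- where they would raise before reaching this branch)
def pvStepA (diccionario_datos : List (String × Int))
    (st : Option String × Option String) (periodo : String) : Option String × Option String :=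
  let total_del_periodo := pvLookup diccionario_datos periodo
  if total_del_periodo ≠ 0 then
    match st with
    | (some menos, some mas) =>
        ((if total_del_periodo < pvLookup diccionario_datos menos then some periodo else some menos),
         (if total_del_periodo > pvLookup diccionario_datos mas then some periodo else some mas))
    | _ => (some periodo, some periodo)
  else st

def obtener_periodos_con_menos_y_mas_ventas_mensuales (diccionario_datos : List (String × Int)) : Option String × Option String :=
  let periodos_de_tiempo := (PySem.Dict.mk diccionario_datos).keys
  periodos_de_tiempo.foldl (pvStepA diccionario_datos) (none, none)

-- ===== PORT B =====
def obtener_periodos_con_menos_y_mas_ventas_mensuales_alt (diccionario_datos : List (String × Int)) : Option String × Option String :=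
  let periodos := (diccionario_datos.filter (fun pv => pv.2 ≠ 0)).map Prod.fst
  if periodos = [] then (none, none)
  else (PySem.List.min? periodos (fun p => pvLookup diccionario_datos p),
        PySem.List.max? periodos (fun p => pvLookup diccionario_datos p))

-- ===== PRECONDITION & SPEC =====
-- Pre_ excludes association lists with a repeated key: those do not represent a Python dict
-- (a dict's keys are unique), so A's behaviour on them is undefined.
def Pre_obtener_periodos_con_menos_y_mas_ventas_mensuales (diccionario_datos : List (String × Int)) : Prop :=
  (diccionario_datos.map Prod.fst).Nodup
instance (diccionario_datos : List (String × Int)) : Decidable (Pre_obtener_periodos_con_menos_y_mas_ventas_mensuales diccionario_datos) := by unfold Pre_obtener_periodos_con_menos_y_mas_ventas_mensuales; infer_instance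
def pvWitness_obtener_periodos_con_menos_y_mas_ventas_mensuales : (List (String × Int)) := [("enero", 5), ("febrero", 0), ("marzo", 2)]

def Spec_obtener_periodos_con_menos_y_mas_ventas_mensuales (diccionario_datos : List (String × Int)) (out : Option String × Option String) : Prop := out = obtener_periodos_con_menos_y_mas_ventas_mensuales_alt diccionario_datos
instance (diccionario_datos : List (String × Int)) (out : Option String × Option String) : Decidable (Spec_obtener_periodos_con_menos_y_mas_ventas_mensuales diccionario_datos out) := by unfold Spec_obtener_periodos_con_menos_y_mas_ventas_mensuales; infer_instance

-- ===== CLAIM (what is proved, stated in full; the proofs are below) =====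
def Claim_equal_obtener_periodos_con_menos_y_mas_ventas_mensuales : Prop := ∀ (diccionario_datos : List (String × Int)), Dom_obtener_periodos_con_menos_y_mas_ventas_mensuales diccionario_datos → Pre_obtener_periodos_con_menos_y_mas_ventas_mensuales diccionario_datos → Spec_obtener_periodos_con_menos_y_mas_ventas_mensuales diccionario_datos (obtener_periodos_con_menos_y_mas_ventas_mensuales diccionario_datos)

-- ===== LEMMAS AND PROOFS =====

-- from a some/some state the loop of A updates the two accumulators componentwise
theorem foldlA_some_some (d : List (String × Int)) (ks : List String) :
    ∀ (m M : String),
      ks.foldl (pvStepA d) (some m, some M) =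
        (PySem.List.min? (m :: ks.filter (fun p => pvLookup d p ≠ 0)) (pvLookup d),
         PySem.List.max? (M :: ks.filter (fun p => pvLookup d p ≠ 0)) (pvLookup d)) := by
  induction ks with
  | nil => intro m M; simp [PySem.List.min?, PySem.List.max?]
  | cons p t ih =>
    intro m M
    by_cases h : pvLookup d p = 0
    · simp [List.foldl_cons, pvStepA, h, ih]
    · simp only [List.foldl_cons, pvStepA, h, ne_eq, not_false_iff, if_pos]
      simp only [List.filter_cons, h, not_false_iff, decide_true, if_true]
      by_cases hlt : pvLookup d p < pvLookup d m <;>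
        by_cases hgt : pvLookup d p > pvLookup d M <;>
          simp [hlt, hgt, ih, PySem.List.min?, PySem.List.max?, List.foldl_cons]

-- A's whole loop computes min?/max? of the non-zero-lookup keys
theorem foldlA_eq (d : List (String × Int)) (ks : List String) :
    ks.foldl (pvStepA d) (none, none) =
      (PySem.List.min? (ks.filter (fun p => pvLookup d p ≠ 0)) (pvLookup d),
       PySem.List.max? (ks.filter (fun p => pvLookup d p ≠ 0)) (pvLookup d)) := by
  induction ks with
  | nil => simp [PySem.List.min?, PySem.List.max?]
  | cons p t ih =>
    by_cases h : pvLookup d p = 0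
    · simp [List.foldl_cons, pvStepA, h, ih]
    · simp only [List.foldl_cons, pvStepA, h, ne_eq, not_false_iff, if_pos]
      simp only [List.filter_cons, h, not_false_iff, decide_true, if_true]
      exact foldlA_some_some d t p p

-- with unique keys, looking a key of the list up yields its paired value
theorem lookup_mem (d : List (String × Int)) (hnd : (d.map Prod.fst).Nodup) :
    ∀ pv ∈ d, pvLookup d pv.1 = pv.2 := by
  intro pv hmem
  have : (PySem.Dict.mk d).keys.Nodup := by
    simpa [PySem.Dict.keys] using hnd
  exact PySem.Dict.getD_of_mem_items (PySem.Dict.mk d) hmem this 0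

-- the two filtered key lists coincide (unique keys)
theorem filters_eq (d : List (String × Int)) (hnd : (d.map Prod.fst).Nodup) :
    (d.map Prod.fst).filter (fun p => pvLookup d p ≠ 0) =
      (d.filter (fun pv => pv.2 ≠ 0)).map Prod.fst := by
  rw [List.filter_map]
  congr 1
  apply List.filter_congr
  intro pv hmem
  simp [Function.comp, lookup_mem d hnd pv hmem]

-- ===== VERDICT (by name: the statement is the Claim_ definition above) =====
theorem obtener_periodos_con_menos_y_mas_ventas_mensuales_spec : Claim_equal_obtener_periodos_con_menos_y_mas_ventas_mensuales := by
  intro d _ hpre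
  unfold Spec_obtener_periodos_con_menos_y_mas_ventas_mensuales
  unfold obtener_periodos_con_menos_y_mas_ventas_mensuales obtener_periodos_con_menos_y_mas_ventas_mensuales_alt
  have hkeys : (PySem.Dict.mk d).keys = d.map Prod.fst := by simp [PySem.Dict.keys]
  rw [hkeys, foldlA_eq, filters_eq d hpre]
  by_cases h : (d.filter (fun pv => pv.2 ≠ 0)).map Prod.fst = []
  · rw [if_pos h, h]; rfl
  · rw [if_neg h]
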